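-- pv_equiv track=rewrite | github.com/Ivanknop/proyectoScrabble | codigo/logica/check_palabra.py | posibles_palabras
-- ===== SOURCE A (Python) =====
-- def posibles_palabras (palabra):
--     '''por cada vocal, que tenga la palabra, genera una posibilidad con Tilde
--     debido a que nuestro programa solo contiene letras sin tilde
--     pero pattern tiene palabras ocn tilde, por ejemplo el juego logicamente ingresa pajaro, sin tilde pero en
--     pattern esta se encuentra ocn tilde. aqui generamos esa lista con posible opciones onc tilde para que pattern las encunetre
--     en su diccionario de palabras'''
--
--     lisPal = []
--     #siempre la primer palabra sera la ingresada por le ugador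
--     lisPal.append(palabra)
--     vocales = {'a':'á', 'e':'é', 'i':'í', 'o':'ó', 'u':'ú'}
--
--     #encontre una forma pythonica de obtener los indices
--     pos = [idx for idx, x in enumerate(palabra) if x in vocales.keys()]
--
--     # for i in range(len(palabra)):
--     #     if palabra[i] in vocales.keys():
--     #
--     #         pos.append(palabra.index(palabra[i]))
--
--
--      #le pongo tilde a esas vocales, y agrego la palabra
--     for it in range(len(pos)):
--         pal_temp = ''
--
--         for it2 in range(len(palabra)):
--
--             if it2 != pos[it]:
--
--                 pal_temp += palabra[it2]
--             else:
--
--                 pal_temp += vocales[palabra[pos[it]]]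
--
--         lisPal.append(pal_temp)
--
--
--     return lisPal
-- ===== SOURCE B (Python) =====
-- def posibles_palabras(palabra):
--     vocales = {'a': 'á', 'e': 'é', 'i': 'í', 'o': 'ó', 'u': 'ú'}
--     return [palabra] + [palabra[:i] + vocales[c] + palabra[i + 1:]
--                         for i, c in enumerate(palabra) if c in vocales]
-- ===== Notes on version B (the rewrite author's own statement) =====
-- stated objective: simpler
-- what changed: Replaced A's two-phase shape (build an index list 'pos', then for each index rebuild the word character by character with string += in a nested loop) by a single comprehension over enumerate(palabra) that splices the accented vowel in with slicing; no index table and no inner rebuild loop.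
import Mathlib
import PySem

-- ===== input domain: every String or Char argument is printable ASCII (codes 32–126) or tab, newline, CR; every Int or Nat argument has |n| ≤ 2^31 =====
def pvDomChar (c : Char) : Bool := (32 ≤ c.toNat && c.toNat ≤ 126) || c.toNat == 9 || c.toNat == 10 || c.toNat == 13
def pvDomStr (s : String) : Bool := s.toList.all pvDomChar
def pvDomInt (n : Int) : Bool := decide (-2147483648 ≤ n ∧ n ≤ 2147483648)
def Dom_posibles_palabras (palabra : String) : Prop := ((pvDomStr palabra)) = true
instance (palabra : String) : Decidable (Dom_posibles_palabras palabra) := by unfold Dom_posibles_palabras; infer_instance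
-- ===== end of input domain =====

-- B replaces A's two-phase shape (index list 'pos' + char-by-char rebuild loop)
-- by one comprehension over enumerate with slicing; objective: simpler.

-- the dict {'a':'á', 'e':'é', 'i':'í', 'o':'ó', 'u':'ú'}
def vocalesDict : PySem.Dict Char Char :=
  PySem.Dict.ofList [('a', 'á'), ('e', 'é'), ('i', 'í'), ('o', 'ó'), ('u', 'ú')]

-- ===== PORT A =====
def posibles_palabras (palabra : String) : List String :=
  let cs := palabra.toList
  let lisPal : List String := [palabra]
  -- pos = [idx for idx, x in enumerate(palabra) if x in vocales.keys()]
  let pos : List Int := (PySem.List.enumerate cs 0).filterMap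
    (fun ix => if (PySem.Dict.get? vocalesDict ix.2).isSome then some ix.1 else none)
  -- for it in range(len(pos)): pal_temp built char by char over it2 in range(len(palabra))
  (PySem.List.pyRange 0 pos.length 1).foldl (fun lis it =>
    let p := PySem.List.pyGetD pos it 0
    let pal_temp : List Char :=
      (PySem.List.pyRange 0 cs.length 1).foldl (fun acc it2 =>
        if it2 ≠ p then
          acc ++ [PySem.List.pyGetD cs it2 ' ']
        else
          acc ++ [PySem.Dict.getD vocalesDict (PySem.List.pyGetD cs p ' ') ' ']) []
    lis ++ [String.ofList pal_temp]) lisPal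

-- ===== PORT B =====
def posibles_palabras_alt (palabra : String) : List String :=
  let cs := palabra.toList
  palabra :: (PySem.List.enumerate cs 0).filterMap (fun ic =>
    match PySem.Dict.get? vocalesDict ic.2 with
    | some t => some (String.ofList
        (PySem.List.slice cs none (some ic.1) ++ [t]
          ++ PySem.List.slice cs (some (ic.1 + 1)) none))
    | none => none)

-- ===== PRECONDITION & SPEC =====
def Spec_posibles_palabras (palabra : String) (out : List String) : Prop := out = posibles_palabras_alt palabra
instance (palabra : String) (out : List String) : Decidable (Spec_posibles_palabras palabra out) := by unfold Spec_posibles_palabras; infer_instance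

-- ===== CLAIM (what is proved, stated in full; the proofs are below) =====
def Claim_equal_posibles_palabras : Prop := ∀ (palabra : String), Dom_posibles_palabras palabra → Spec_posibles_palabras palabra (posibles_palabras palabra)

-- ===== LEMMAS AND PROOFS =====

lemma map_range_getD {α : Type} (d : α) (l : List α) :
    (List.range l.length).map (fun j => l.getD j d) = l := by
  apply List.ext_getElem (by simp)
  intro i h1 h2
  simp [List.getElem?_eq_getElem h2]

-- the inner character-rebuild of A, as a range-map, equals the spliced word
lemma range_map_ite (cs : List Char) (T : Char) (k : Nat) (hk : k < cs.length) :
    (List.range cs.length).map (fun j => if j = k then T else cs.getD j ' ')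
      = cs.take k ++ T :: cs.drop (k + 1) := by
  rw [← List.set_eq_take_cons_drop T hk]
  apply List.ext_getElem (by simp)
  intro i h1 h2
  simp only [List.length_map, List.length_range] at h1
  simp only [List.getElem_map, List.getElem_range, List.getElem_set]
  by_cases h : i = k
  · simp [h]
  · rw [if_neg h, if_neg (fun e => h e.symm), List.getD_eq_getElem cs ' ' h1]

-- per-vowel-position: A's rebuilt word equals B's spliced word
lemma word_eq (cs : List Char) (k : Nat) (hk : k < cs.length) (t : Char)
    (ht : PySem.Dict.get? vocalesDict cs[k] = some t) :
    (PySem.List.pyRange 0 cs.length 1).foldl (fun acc it2 =>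
        if it2 ≠ (k : Int) then
          acc ++ [PySem.List.pyGetD cs it2 ' ']
        else
          acc ++ [PySem.Dict.getD vocalesDict (PySem.List.pyGetD cs (k : Int) ' ') ' ']) []
      = PySem.List.slice cs none (some (k : Int)) ++ [t]
          ++ PySem.List.slice cs (some ((k : Int) + 1)) none := by
  have hbody : (fun (acc : List Char) (it2 : Int) =>
        if it2 ≠ (k : Int) then
          acc ++ [PySem.List.pyGetD cs it2 ' ']
        else
          acc ++ [PySem.Dict.getD vocalesDict (PySem.List.pyGetD cs (k : Int) ' ') ' '])
      = (fun acc it2 => acc ++ [if it2 ≠ (k : Int) then PySem.List.pyGetD cs it2 ' '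
          else PySem.Dict.getD vocalesDict (PySem.List.pyGetD cs (k : Int) ' ') ' ']) := by
    funext acc it2; split_ifs <;> rfl
  rw [hbody, PySem.List.foldl_append_singleton_eq_map, List.nil_append,
    PySem.List.pyRange_zero_natCast, List.map_map]
  have hT : PySem.Dict.getD vocalesDict (PySem.List.pyGetD cs (k : Int) ' ') ' ' = t := by
    rw [PySem.List.pyGetD_natCast, List.getD_eq_getElem cs ' ' hk,
      PySem.Dict.getD, ht]
    rfl
  have hfun : ((fun it2 : Int => if it2 ≠ (k : Int) then PySem.List.pyGetD cs it2 ' '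
        else PySem.Dict.getD vocalesDict (PySem.List.pyGetD cs (k : Int) ' ') ' ') ∘ (Nat.cast : ℕ → ℤ))
      = (fun j : Nat => if j = k then t else cs.getD j ' ') := by
    funext j
    simp only [Function.comp]
    by_cases h : j = k
    · have hjk : ¬((j : Int) ≠ (k : Int)) := not_not_intro (by exact_mod_cast h)
      rw [if_neg hjk, hT, if_pos h]
    · have hji : (j : Int) ≠ (k : Int) := by exact_mod_cast h
      rw [if_pos hji, if_neg h, PySem.List.pyGetD_natCast]
  rw [hfun, range_map_ite cs t k hk]
  have h1 : PySem.List.slice cs none (some (k : Int)) = cs.take k :=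
    PySem.List.slice_to_natCast cs k
  have h2 : PySem.List.slice cs (some ((k : Int) + 1)) none = cs.drop (k + 1) := by
    have h3 : (k : Int) + 1 = ((k + 1 : Nat) : Int) := by push_cast; ring
    rw [h3, PySem.List.slice_from_natCast]
  rw [h1, h2]
  simp

-- A's outer loop ('for it in range(len(pos)): lisPal.append(g(pos[it]))') as a map over pos
lemma outer_map (palabra : String) (pos : List Int) (g : Int → String) :
    (PySem.List.pyRange 0 pos.length 1).foldl (fun lis it =>
        lis ++ [g (PySem.List.pyGetD pos it 0)]) [palabra]
      = palabra :: pos.map g := by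
  rw [PySem.List.foldl_append_singleton_eq_map, PySem.List.pyRange_zero_natCast,
    List.map_map]
  have h1 : ((fun it => g (PySem.List.pyGetD pos it 0)) ∘ (Nat.cast : ℕ → ℤ))
      = (g ∘ fun j : Nat => pos.getD j 0) := by
    funext j; simp [Function.comp, PySem.List.pyGetD_natCast]
  rw [h1, ← List.map_map, map_range_getD]
  rfl

-- ===== VERDICT (by name: the statement is the Claim_ definition above) =====
theorem posibles_palabras_spec : Claim_equal_posibles_palabras := by
  intro palabra _
  unfold Spec_posibles_palabras posibles_palabras posibles_palabras_alt
  refine ((outer_map palabra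
      ((PySem.List.enumerate palabra.toList 0).filterMap
        (fun ix => if (PySem.Dict.get? vocalesDict ix.2).isSome then some ix.1 else none))
      (fun p => String.ofList
        ((PySem.List.pyRange 0 palabra.toList.length 1).foldl (fun acc it2 =>
          if it2 ≠ p then
            acc ++ [PySem.List.pyGetD palabra.toList it2 ' ']
          else
            acc ++ [PySem.Dict.getD vocalesDict (PySem.List.pyGetD palabra.toList p ' ') ' ']) []))).trans ?_)
  show palabra :: List.map _ _ = palabra :: List.filterMap _ _
  congr 1
  rw [List.map_filterMap]
  apply List.filterMap_congr
  intro ic hic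
  obtain ⟨k, hk, hick⟩ : ∃ k, ∃ h : k < palabra.toList.length, ic = ((k : Int), palabra.toList[k]) := by
    rw [List.mem_iff_getElem] at hic
    obtain ⟨k, hk, hget⟩ := hic
    rw [PySem.List.length_enumerate] at hk
    refine ⟨k, hk, ?_⟩
    rw [← hget, PySem.List.getElem_enumerate]
    simp
  subst hick
  cases hv : PySem.Dict.get? vocalesDict (palabra.toList[k]) with
  | none => simp
  | some t =>
    simp only [Option.isSome_some, if_pos, Option.map_some]
    congr 2
    exact word_eq palabra.toList k hk t hv
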